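-- pv_equiv track=rewrite | github.com/belkinot/DRESS-BA | dress_implementation.py | check_ml_constraints_in_clustering
-- ===== SOURCE A (Python) =====
-- def check_ml_constraints_in_clustering(constraints, clustering):
--     """Prüft wie viele ML-Constraints erfüllt sind"""
--     # Annahme: Clustering ist eine Liste von Listen mit Indizes ((1,2,5), (3,4), (6,9), (7,8))
--     constraint_sat = 0
--
--     for constraint in constraints:
--         for key in clustering:
--             if constraint[0] in clustering[key]:
--                 if constraint[1] in clustering[key]:
--                     constraint_sat += 1
--
--     return constraint_sat
-- ===== SOURCE B (Python) =====
-- def check_ml_constraints_in_clustering(constraints, clustering):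
--     """Prüft wie viele ML-Constraints erfüllt sind (inverted-index version)"""
--     index = {}
--     for key, members in clustering.items():
--         for m in members:
--             index.setdefault(m, set()).add(key)
--     total = 0
--     for constraint in constraints:
--         total += len(index.get(constraint[0], set()) & index.get(constraint[1], set()))
--     return total
-- ===== Notes on version B (the rewrite author's own statement) =====
-- stated objective: faster
-- what changed: Replaced A's per-constraint scan over every cluster (with a membership test into each member list) by one inverted index built in a single pass over the clustering, mapping each element to the set of cluster keys containing it; each constraint is then answered by intersecting two key sets.
import Mathlib
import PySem

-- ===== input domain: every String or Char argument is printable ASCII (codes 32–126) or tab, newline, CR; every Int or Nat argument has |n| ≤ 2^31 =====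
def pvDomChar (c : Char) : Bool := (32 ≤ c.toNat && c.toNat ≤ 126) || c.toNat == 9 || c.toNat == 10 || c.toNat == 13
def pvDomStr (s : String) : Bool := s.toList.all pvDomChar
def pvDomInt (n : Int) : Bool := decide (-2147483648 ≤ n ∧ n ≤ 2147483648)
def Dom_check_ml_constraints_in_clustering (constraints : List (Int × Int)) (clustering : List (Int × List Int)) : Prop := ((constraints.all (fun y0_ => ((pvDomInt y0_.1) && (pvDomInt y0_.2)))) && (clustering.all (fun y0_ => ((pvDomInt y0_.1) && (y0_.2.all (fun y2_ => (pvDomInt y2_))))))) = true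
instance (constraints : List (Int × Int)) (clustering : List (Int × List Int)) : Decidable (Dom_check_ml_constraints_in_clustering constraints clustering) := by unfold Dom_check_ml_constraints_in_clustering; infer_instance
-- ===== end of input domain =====

-- B replaces A's per-constraint scan over every cluster by an inverted index (element -> set of cluster
-- keys) built once, answering each constraint by a set intersection (objective: faster).


-- ===== PORT A =====
-- A: for each constraint, scan the dict's keys and test both endpoints against clustering[key].
-- (the List (Int × List Int) argument denotes a Python dict; Dict.ofList is that reading, last key wins)
def check_ml_constraints_in_clustering (constraints : List (Int × Int)) (clustering : List (Int × List Int)) : Int :=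
  let d := PySem.Dict.ofList clustering
  constraints.foldl (fun sat c =>
    d.keys.foldl (fun sat key =>
      if (d.getD key []).contains c.1 then
        if (d.getD key []).contains c.2 then sat + 1 else sat
      else sat) sat) 0

-- ===== PORT B =====
-- B: build an inverted index m ↦ set of cluster keys containing m, then sum set-intersection sizes.
def check_ml_constraints_in_clustering_alt (constraints : List (Int × Int)) (clustering : List (Int × List Int)) : Int :=
  let d := PySem.Dict.ofList clustering
  let index : PySem.Dict Int (PySem.Set Int) :=
    d.items.foldl (fun idx kv =>
      kv.2.foldl (fun idx m => idx.modify m PySem.Set.empty (fun s => PySem.Set.add s kv.1)) idx)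
      PySem.Dict.empty
  constraints.foldl (fun total c =>
    total + PySem.Set.len (PySem.Set.inter (index.getD c.1 PySem.Set.empty) (index.getD c.2 PySem.Set.empty))) 0

-- ===== PRECONDITION & SPEC =====
def Spec_check_ml_constraints_in_clustering (constraints : List (Int × Int)) (clustering : List (Int × List Int)) (out : Int) : Prop := out = check_ml_constraints_in_clustering_alt constraints clustering
instance (constraints : List (Int × Int)) (clustering : List (Int × List Int)) (out : Int) : Decidable (Spec_check_ml_constraints_in_clustering constraints clustering out) := by unfold Spec_check_ml_constraints_in_clustering; infer_instance

-- ===== CLAIM (what is proved, stated in full; the proofs are below) =====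
def Claim_equal_check_ml_constraints_in_clustering : Prop := ∀ (constraints : List (Int × Int)) (clustering : List (Int × List Int)), Dom_check_ml_constraints_in_clustering constraints clustering → Spec_check_ml_constraints_in_clustering constraints clustering (check_ml_constraints_in_clustering constraints clustering)

-- ===== LEMMAS AND PROOFS =====

-- folding one cluster's member list into the index only touches the entries of its members
theorem idx_inner (ms : List Int) (idx : PySem.Dict Int (PySem.Set Int)) (k m : Int) :
    (ms.foldl (fun idx m' => idx.modify m' PySem.Set.empty (fun s => PySem.Set.add s k)) idx).getD m PySem.Set.empty
      = if m ∈ ms then PySem.Set.add (idx.getD m PySem.Set.empty) k else idx.getD m PySem.Set.empty := by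
  induction ms generalizing idx with
  | nil => simp
  | cons a t ih =>
    simp only [List.foldl_cons, ih, PySem.Dict.getD_modify, List.mem_cons]
    by_cases hm : m = a <;> by_cases ht : m ∈ t <;> simp [hm, ht]

-- the index entry for m collects, in order, the keys of the clusters whose member list contains m
theorem idx_getD (L : List (Int × List Int)) (idx : PySem.Dict Int (PySem.Set Int)) (m : Int) :
    (L.foldl (fun idx kv =>
        kv.2.foldl (fun idx m' => idx.modify m' PySem.Set.empty (fun s => PySem.Set.add s kv.1)) idx) idx).getD m PySem.Set.empty
      = ((L.filter (fun kv => kv.2.contains m)).map Prod.fst).foldl PySem.Set.add (idx.getD m PySem.Set.empty) := by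
  induction L generalizing idx with
  | nil => simp
  | cons kv t ih =>
    simp only [List.foldl_cons, ih, idx_inner, List.filter_cons]
    by_cases hm : m ∈ kv.2 <;> simp [hm]

-- per-constraint value of B equals A's per-constraint count, over an item list with distinct keys
theorem perconstraint (L : List (Int × List Int)) (hnd : (L.map Prod.fst).Nodup) (c1 c2 : Int) :
    PySem.Set.len (PySem.Set.inter
        (((L.filter (fun kv => kv.2.contains c1)).map Prod.fst).foldl PySem.Set.add PySem.Set.empty)
        (((L.filter (fun kv => kv.2.contains c2)).map Prod.fst).foldl PySem.Set.add PySem.Set.empty))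
      = (L.countP (fun kv => kv.2.contains c1 && kv.2.contains c2) : Int) := by
  have hself : ∀ c : Int, ((L.filter (fun kv => kv.2.contains c)).map Prod.fst).foldl PySem.Set.add PySem.Set.empty
      = (L.filter (fun kv => kv.2.contains c)).map Prod.fst := by
    intro c
    have hsub : ((L.filter (fun kv => kv.2.contains c)).map Prod.fst).Sublist (L.map Prod.fst) :=
      (L.filter_sublist).map Prod.fst
    have he : PySem.Set.empty = ([] : List Int) := rfl
    rw [he, ← PySem.Set.ofList_eq_foldl]
    exact PySem.Set.ofList_eq_self_of_nodup _ (hnd.sublist hsub)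
  rw [hself, hself]
  -- membership in the second key set is the c2-test on the (unique) entry with that key
  have hmem : ∀ kv ∈ L, (((L.filter (fun kv => kv.2.contains c2)).map Prod.fst).contains kv.1)
      = kv.2.contains c2 := by
    intro kv hkv
    by_cases h2 : kv.2.contains c2 = true
    · rw [h2, List.contains_eq_mem, decide_eq_true_eq]
      exact List.mem_map.mpr ⟨kv, List.mem_filter.mpr ⟨hkv, h2⟩, rfl⟩
    · rw [Bool.eq_false_iff.mpr h2, List.contains_eq_mem]
      rw [decide_eq_false_iff_not]
      rintro hm
      obtain ⟨kv', hkv', hfst⟩ := List.mem_map.mp hm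
      obtain ⟨hkv'L, h2'⟩ := List.mem_filter.mp hkv'
      have heq := List.inj_on_of_nodup_map hnd hkv'L hkv hfst
      exact h2 (heq ▸ h2')
  simp only [PySem.Set.inter, PySem.Set.len, PySem.Set.contains, List.filter_map]
  rw [List.length_map, ← List.countP_eq_length_filter, List.countP_filter]
  congr 1
  refine List.countP_congr ?_
  intro kv hkv
  rw [Function.comp_apply, hmem kv hkv]
  constructor <;> (intro h; simp_all)

-- ===== VERDICT (by name: the statement is the Claim_ definition above) =====
theorem check_ml_constraints_in_clustering_spec : Claim_equal_check_ml_constraints_in_clustering := by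
  intro constraints clustering _
  unfold Spec_check_ml_constraints_in_clustering
  unfold check_ml_constraints_in_clustering check_ml_constraints_in_clustering_alt
  simp only []
  set d := PySem.Dict.ofList clustering with hd
  have hnd : (d.items.map Prod.fst).Nodup := PySem.Dict.nodup_keys_ofList clustering
  refine PySem.List.foldl_congr_mem _ _ _ _ ?_
  intro acc c _
  -- A side: the nested ifs are one Bool test, and the key loop is a count over the items
  have hA : d.keys.foldl (fun sat key =>
      if (d.getD key []).contains c.1 then
        if (d.getD key []).contains c.2 then sat + 1 else sat
      else sat) acc
      = acc + (d.items.countP (fun kv => kv.2.contains c.1 && kv.2.contains c.2) : Int) := by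
    rw [PySem.List.foldl_congr_mem _ _
      (fun sat key => if ((d.getD key []).contains c.1 && (d.getD key []).contains c.2) then sat + 1 else sat) _
      (by intro acc' key _; by_cases h1 : (d.getD key []).contains c.1 <;>
          by_cases h2 : (d.getD key []).contains c.2 <;> simp_all)]
    rw [PySem.List.foldl_if_add_one]
    congr 1
    show ((d.items.map (fun x => x.1)).countP _ : Int) = _
    rw [List.countP_map]
    congr 1
    refine List.countP_congr ?_
    intro kv hkv
    have := PySem.Dict.getD_of_mem_items (d := d) (k := kv.1) (v := kv.2) hkv hnd ([] : List Int)
    simp [Function.comp, this]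
  -- B side: the index lookup is the ordered key list of the clusters containing the element
  have hB : ∀ m : Int,
      ((d.items.foldl (fun idx kv =>
        kv.2.foldl (fun idx m' => idx.modify m' PySem.Set.empty (fun s => PySem.Set.add s kv.1)) idx)
        PySem.Dict.empty).getD m PySem.Set.empty)
      = ((d.items.filter (fun kv => kv.2.contains m)).map Prod.fst).foldl PySem.Set.add PySem.Set.empty := by
    intro m; rw [idx_getD, PySem.Dict.getD_empty]
  rw [hA, hB, hB, perconstraint d.items hnd c.1 c.2]
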